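-- pv_equiv track=rewrite | github.com/HelloYeew/kurohato-and-his-python | 08_BoW.py | clear_word
-- ===== SOURCE A (Python) =====
-- CHAR_LIST = "abcdefghijklmnopqrstuvwxyzABCDEFGHIJKLMNOPQRSTUVWXYZ012345678"
--
-- def clear_word(word):
--     """Get a word, clear a word to just a word and convert it to lowercase
--     Parameter : Ugly like shit word from anywhere (Kasumi's house?)
--     Return : Word as a list (because it must support if it have a separator in there)
--
--     Doctest :
--         >>> clear_word("Abc:a18")
--         ['abc', 'a18']
--     """
--     result_list = []
--     # Turn a word to lowercase
--     word = word.lower()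
--     # Convert to list to for loop
--     word_list = list(word)
--     # For loop to seperate character and (if) seperator and set it to result_list
--     for i in range(len(word_list)):
--         if word_list[i] in CHAR_LIST:
--             result_list.append(word_list[i])
--         else:
--             result_list.append(" ")
--     # Convert result list to normal string (Make it easier to find a real 'space')
--     result_list = "".join(result_list)
--     # Convert back to list again but we have a real 'space' bewteen word now
--     result_list = result_list.split(" ")
--     # Next : We must clear some shit if a member in result list is ' ' (blank space)
--     # First, we must find that how many shit space we have by using for loop.
--     space_number = 0
--     other_number = 0
--     for member in result_list:
--         if member == ' ':
--             space_number += 1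
--         elif member == '':
--             other_number += 1
--     # Second, use function 'remove' to remove a shit space n times. We cannot use remove and not check a number
--     # because if it not have blank space in result_list it will run to error.
--     if space_number != 0:
--         for i in range(space_number):
--             result_list.remove(' ')
--     if other_number != 0:
--         for i in range(other_number):
--             result_list.remove('')
--     # Complete! Then, return!
--     return result_list
-- ===== SOURCE B (Python) =====
-- CHAR_LIST = "abcdefghijklmnopqrstuvwxyzABCDEFGHIJKLMNOPQRSTUVWXYZ012345678"
--
-- def clear_word(word):
--     result = []
--     buf = ""
--     for ch in word.lower():
--         if ch in CHAR_LIST: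
--             buf += ch
--         elif buf:
--             result.append(buf)
--             buf = ""
--     if buf:
--         result.append(buf)
--     return result
-- ===== Notes on version B (the rewrite author's own statement) =====
-- stated objective: simpler
-- what changed: Replaces A's five-stage pipeline (mark separators as spaces, join, split on space, count blanks, repeated list.remove) by one pass over word.lower() that grows a token buffer and flushes it at each separator, reusing the exact CHAR_LIST (including its '9' omission).
import Mathlib
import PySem

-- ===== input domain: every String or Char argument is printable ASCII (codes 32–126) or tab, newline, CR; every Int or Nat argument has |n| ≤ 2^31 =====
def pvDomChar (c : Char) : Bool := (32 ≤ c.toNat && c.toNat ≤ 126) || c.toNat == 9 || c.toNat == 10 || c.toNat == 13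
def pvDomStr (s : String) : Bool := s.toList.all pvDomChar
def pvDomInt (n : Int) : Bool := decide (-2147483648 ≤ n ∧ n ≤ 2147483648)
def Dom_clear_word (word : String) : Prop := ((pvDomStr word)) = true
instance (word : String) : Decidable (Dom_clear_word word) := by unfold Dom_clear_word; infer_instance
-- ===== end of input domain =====

-- B replaces A's five-stage pipeline (mark separators as spaces, join, split, count blanks, repeated list.remove)
-- by a single pass with a token buffer; same return value on every input.

-- ===== PORT A =====
def CHAR_LIST : String := "abcdefghijklmnopqrstuvwxyzABCDEFGHIJKLMNOPQRSTUVWXYZ012345678"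

def clear_word (word : String) : List String :=
  let word' := PySem.Str.lower word
  let word_list : List Char := word'.toList
  -- for i in range(len(word_list)): append word_list[i] (as a 1-char string) or " "
  let result_chars : List String :=
    (PySem.List.pyRange 0 (PySem.List.len word_list) 1).foldl
      (fun acc i =>
        if PySem.Str.isIn (String.ofList [PySem.List.pyGetD word_list i ' ']) CHAR_LIST then
          acc ++ [String.ofList [PySem.List.pyGetD word_list i ' ']]
        else
          acc ++ [" "]) []
  let joined : String := PySem.Str.join "" result_chars
  -- " " is non-empty so split? is always `some`; the getD default is unreachable
  let result_list : List String := (PySem.Str.split? joined " ").getD []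
  let counts : Nat × Nat :=
    result_list.foldl
      (fun p member =>
        if member = " " then (p.1 + 1, p.2)
        else if member = "" then (p.1, p.2 + 1) else p) (0, 0)
  -- remove? is `some` here because the count bounds the removals; getD only for totality
  let result_list₁ :=
    if counts.1 ≠ 0 then
      (PySem.List.pyRange 0 (counts.1 : Int) 1).foldl
        (fun l _ => ((PySem.List.remove? l " ").getD l)) result_list
    else result_list
  let result_list₂ :=
    if counts.2 ≠ 0 then
      (PySem.List.pyRange 0 (counts.2 : Int) 1).foldl
        (fun l _ => ((PySem.List.remove? l "").getD l)) result_list₁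
    else result_list₁
  result_list₂

-- ===== PORT B =====
def clear_word_alt (word : String) : List String :=
  let st := (PySem.Str.lower word).toList.foldl
    (fun (st : List String × List Char) ch =>
      if PySem.Str.isIn (String.ofList [ch]) CHAR_LIST then
        (st.1, st.2 ++ [ch])
      else if st.2 ≠ [] then
        (st.1 ++ [String.ofList st.2], [])
      else st) ([], [])
  if st.2 ≠ [] then st.1 ++ [String.ofList st.2] else st.1

-- ===== PRECONDITION & SPEC =====
def Spec_clear_word (word : String) (out : List String) : Prop := out = clear_word_alt word
instance (word : String) (out : List String) : Decidable (Spec_clear_word word out) := by unfold Spec_clear_word; infer_instance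

-- ===== CLAIM (what is proved, stated in full; the proofs are below) =====
def Claim_equal_clear_word : Prop := ∀ (word : String), Dom_clear_word word → Spec_clear_word word (clear_word word)

-- ===== LEMMAS AND PROOFS =====

-- `c in CHAR_LIST` for a single character
def pvAllowed (c : Char) : Bool := PySem.Str.isIn (String.ofList [c]) CHAR_LIST

-- the character A writes into the joined string
def pvMask (c : Char) : Char := if pvAllowed c then c else ' '

-- str.split(" ") on the char level, reference recursion
def pvSpl : List Char → List Char → List (List Char)
  | [], cur => [cur.reverse]
  | c :: rest, cur => if c = ' ' then cur.reverse :: pvSpl rest [] else pvSpl rest (c :: cur)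

lemma pvAllowed_mem {c : Char} (h : pvAllowed c = true) : c ∈ CHAR_LIST.toList := by
  have h' : PySem.Chars.isIn [c] CHAR_LIST.toList = true := by
    simpa [pvAllowed, PySem.Str.isIn] using h
  have := (PySem.Chars.isIn_iff_infix _ _).mp h'
  exact this.subset (List.mem_singleton_self c)

lemma pvAllowed_ne_space {c : Char} (h : pvAllowed c = true) : c ≠ ' ' := by
  intro rfl'
  subst rfl'
  have := pvAllowed_mem h
  revert this
  decide



lemma pv_go_spec : ∀ (l : List Char) (fuel : Nat) (cur : List Char) (acc : List (List Char)),
    l.length ≤ fuel →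
    PySem.Chars.splitOn.go [' '] fuel l cur acc = acc.reverse ++ pvSpl l cur := by
  intro l
  induction l with
  | nil =>
    intro fuel cur acc _
    cases fuel <;> simp [PySem.Chars.splitOn.go, pvSpl]
  | cons c rest ih =>
    intro fuel cur acc h
    cases fuel with
    | zero => simp at h
    | succ f =>
      have hr : rest.length ≤ f := by simpa using h
      by_cases hc : c = ' '
      · subst hc
        simp only [PySem.Chars.splitOn.go, List.isPrefixOf, beq_self_eq_true, Bool.true_and]
        simp [ih _ _ _ hr, pvSpl]
      · simp only [PySem.Chars.splitOn.go, List.isPrefixOf]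
        have hne : (' ' == c) = false := by simpa using (Ne.symm hc)
        simp [hne, ih _ _ _ hr, pvSpl, hc]

lemma pv_splitOn_space (s : List Char) : PySem.Chars.splitOn s [' '] = pvSpl s [] := by
  unfold PySem.Chars.splitOn
  simpa using pv_go_spec s (s.length + 1) [] [] (by omega)

-- pieces produced by pvSpl never contain a space
lemma pvSpl_no_space : ∀ (l cur : List Char), ' ' ∉ cur → ∀ p ∈ pvSpl l cur, ' ' ∉ p := by
  intro l
  induction l with
  | nil =>
    intro cur hcur p hp
    simp [pvSpl] at hp
    subst hp
    simpa using hcur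
  | cons c rest ih =>
    intro cur hcur p hp
    by_cases hc : c = ' '
    · subst hc
      simp [pvSpl] at hp
      rcases hp with hp | hp
      · subst hp; simpa using hcur
      · exact ih [] (by simp) p hp
    · simp [pvSpl, hc] at hp
      exact ih (c :: cur) (by simp [hcur, Ne.symm hc]) p hp

-- A's counting loop computes the two counts
lemma pv_countfold : ∀ (l : List String) (a b : Nat),
    l.foldl (fun p member =>
        if member = " " then (p.1 + 1, p.2)
        else if member = "" then (p.1, p.2 + 1) else p) (a, b)
      = (a + l.count " ", b + l.count "") := by
  intro l
  induction l with
  | nil => simp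
  | cons m rest ih =>
    intro a b
    by_cases h1 : m = " "
    · subst h1
      simp [ih]
      omega
    · by_cases h2 : m = ""
      · subst h2
        simp [ih]
        omega
      · simp [h1, h2, ih, List.count_cons]

lemma pv_foldl_ignore {α β : Type} (f : α → α) :
    ∀ (xs : List β) (init : α), xs.foldl (fun a _ => f a) init = f^[xs.length] init := by
  intro xs
  induction xs with
  | nil => simp
  | cons x rest ih =>
    intro init
    simp [ih, Function.iterate_succ_apply]

lemma pv_filter_ne_erase (v : String) : ∀ (l : List String),
    (l.erase v).filter (· ≠ v) = l.filter (· ≠ v) := by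
  intro l
  induction l with
  | nil => simp
  | cons x rest ih =>
    by_cases hx : x = v
    · subst hx
      rw [List.erase_cons_head, List.filter_cons]
      simp
    · rw [List.erase_cons_tail (by simpa using hx), List.filter_cons, List.filter_cons, ih]

lemma pv_removeIter (v : String) : ∀ (n : Nat) (l : List String), l.count v = n →
    (fun l => ((PySem.List.remove? l v).getD l))^[n] l = l.filter (· ≠ v) := by
  intro n
  induction n with
  | zero =>
    intro l h
    have hv : v ∉ l := List.count_eq_zero.mp h
    simp only [Function.iterate_zero, id]
    exact (List.filter_eq_self.mpr (fun x hx => by simp; rintro rfl; exact hv hx)).symm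
  | succ k ih =>
    intro l h
    have hv : v ∈ l := List.count_pos_iff.mp (by omega)
    rw [Function.iterate_succ_apply]
    simp only [PySem.List.remove?_eq_some_erase l v hv, Option.getD_some]
    have hcount : (l.erase v).count v = k := by
      rw [List.count_erase_self]
      simp [h]
    rw [ih _ hcount, pv_filter_ne_erase]

-- the removal loop of A removes every occurrence of v
lemma pv_removeloop (v : String) (l : List String) :
    (PySem.List.pyRange 0 ((l.count v : Nat) : Int) 1).foldl
        (fun l _ => ((PySem.List.remove? l v).getD l)) l = l.filter (· ≠ v) := by
  rw [pv_foldl_ignore]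
  rw [show (PySem.List.pyRange 0 ((l.count v : Nat) : Int) 1).length = l.count v by
    simp [PySem.List.length_pyRange_one]]
  exact pv_removeIter v _ l rfl

-- A's first loop builds the per-character marks
lemma pv_marks (word_list : List Char) :
    (PySem.List.pyRange 0 (PySem.List.len word_list) 1).foldl
      (fun acc i =>
        if PySem.Str.isIn (String.ofList [PySem.List.pyGetD word_list i ' ']) CHAR_LIST then
          acc ++ [String.ofList [PySem.List.pyGetD word_list i ' ']]
        else
          acc ++ [" "]) []
    = word_list.map (fun c => if pvAllowed c then String.ofList [c] else " ") := by
  rw [PySem.List.foldl_pyRange_zero_pyGetD word_list ' '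
      (fun acc c => if PySem.Str.isIn (String.ofList [c]) CHAR_LIST then
          acc ++ [String.ofList [c]] else acc ++ [" "]) []]
  suffices h : ∀ (l : List Char) (acc : List String),
      l.foldl (fun acc c => if PySem.Chars.isIn [c] CHAR_LIST.toList then
          acc ++ [String.ofList [c]] else acc ++ [" "]) acc
        = acc ++ l.map (fun c => if pvAllowed c then String.ofList [c] else " ") by
    simpa using h word_list []
  intro l
  induction l with
  | nil => simp
  | cons c rest ih =>
    intro acc
    by_cases hc : pvAllowed c
    · have h1 : PySem.Chars.isIn [c] CHAR_LIST.toList = true := by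
        simpa [pvAllowed, PySem.Str.isIn] using hc
      simp only [List.foldl_cons, h1, if_true, List.map_cons, hc]
      rw [ih]
      simp
    · have h1 : PySem.Chars.isIn [c] CHAR_LIST.toList = false := by
        simpa [pvAllowed, PySem.Str.isIn] using hc
      simp only [List.foldl_cons, h1, Bool.false_eq_true, if_false, List.map_cons, hc]
      rw [ih]
      simp

-- joining the marks gives the masked character string
lemma pv_toList_marks (word_list : List Char) :
    (PySem.Str.join "" (word_list.map
        (fun c => if pvAllowed c then String.ofList [c] else " "))).toList
      = word_list.map pvMask := by
  rw [PySem.Str.toList_join]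
  have h : (word_list.map (fun c => if pvAllowed c then String.ofList [c] else " ")).map
        String.toList = (word_list.map pvMask).map (fun c => [c]) := by
    simp only [List.map_map]
    refine List.map_congr_left (fun c _ => ?_)
    by_cases hc : pvAllowed c <;> simp [Function.comp, hc, pvMask]
  rw [h]
  simpa using PySem.Chars.join_nil_singletons (word_list.map pvMask)

lemma pv_split (j : String) :
    (PySem.Str.split? j " ").getD [] = (PySem.Chars.splitOn j.toList [' ']).map String.ofList := by
  simp [PySem.Str.split?, PySem.Chars.split?]

lemma pv_ofList_eq_empty {p : List Char} (h : String.ofList p = "") : p = [] := by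
  have := congrArg String.toList h
  simpa using this

lemma pv_filter_map (chunks : List (List Char)) :
    (chunks.map String.ofList).filter (· ≠ "") = (chunks.filter (· ≠ [])).map String.ofList := by
  induction chunks with
  | nil => simp
  | cons p rest ih =>
    replace ih : List.filter (fun x => !decide (x = "")) (List.map String.ofList rest) =
        List.map String.ofList (List.filter (fun x => !decide (x = [])) rest) := by
      simpa using ih
    by_cases hp : p = []
    · subst hp
      simp [ih]
    · have h1 : String.ofList p ≠ "" := fun h => hp (pv_ofList_eq_empty h)
      simp [List.filter_cons, h1, hp, ih]

-- B's single pass equals filter-nonempty of the space-split of the masked string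
lemma pv_alt_main : ∀ (cs : List Char) (acc : List String) (buf : List Char),
    (let st := cs.foldl
        (fun (st : List String × List Char) ch =>
          if PySem.Str.isIn (String.ofList [ch]) CHAR_LIST then
            (st.1, st.2 ++ [ch])
          else if st.2 ≠ [] then
            (st.1 ++ [String.ofList st.2], [])
          else st) (acc, buf);
      if st.2 ≠ [] then st.1 ++ [String.ofList st.2] else st.1)
    = acc ++ ((pvSpl (cs.map pvMask) buf.reverse).filter (· ≠ [])).map String.ofList := by
  intro cs
  induction cs with
  | nil =>
    intro acc buf
    by_cases hb : buf = [] <;> simp [pvSpl, hb]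
  | cons c rest ih =>
    intro acc buf
    by_cases hA : pvAllowed c
    · have h1 : PySem.Str.isIn (String.ofList [c]) CHAR_LIST = true := hA
      have h2 : pvMask c = c := by simp [pvMask, hA]
      have h3 : c ≠ ' ' := pvAllowed_ne_space hA
      simp only [List.map_cons, List.foldl_cons, h1, if_true, h2]
      rw [pvSpl]
      simp only [h3, if_false]
      have h4 : c :: buf.reverse = (buf ++ [c]).reverse := by simp
      rw [h4]
      exact ih acc (buf ++ [c])
    · have h1 : PySem.Str.isIn (String.ofList [c]) CHAR_LIST = false := by
        simpa [pvAllowed] using hA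
      have h2 : pvMask c = ' ' := by simp [pvMask, hA]
      simp only [List.map_cons, List.foldl_cons, h1, Bool.false_eq_true, if_false, h2]
      rw [pvSpl]
      simp only [if_pos rfl, List.reverse_reverse]
      by_cases hb : buf = []
      · subst hb
        simp only [ne_eq, not_true_eq_false, if_false]
        simpa using ih acc []
      · simp only [ne_eq, hb, not_false_eq_true, if_true, List.filter_cons]
        simp only [hb, decide_true, not_false_eq_true, decide_not, Bool.not_eq_false']
        have := ih (acc ++ [String.ofList buf]) []
        simp only [List.reverse_nil] at this
        rw [this]
        simp [hb]

-- ===== VERDICT (by name: the statement is the Claim_ definition above) =====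
theorem clear_word_spec : Claim_equal_clear_word := by
  unfold Claim_equal_clear_word
  intro word _
  unfold Spec_clear_word
  have hB : clear_word_alt word
      = ((pvSpl ((PySem.Str.lower word).toList.map pvMask) []).filter (· ≠ [])).map
          String.ofList := by
    simp only [clear_word_alt]
    simpa using pv_alt_main (PySem.Str.lower word).toList [] []
  simp only [clear_word]
  rw [pv_marks, pv_split, pv_toList_marks, pv_splitOn_space, pv_countfold]
  set cs := (PySem.Str.lower word).toList with hcs
  set pieces := (pvSpl (cs.map pvMask) []).map String.ofList with hpieces
  have hsp : pieces.count " " = 0 := by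
    rw [List.count_eq_zero]
    intro hmem
    rw [hpieces, List.mem_map] at hmem
    obtain ⟨chunk, hchunk, heq⟩ := hmem
    have hs : ' ' ∈ chunk := by
      have := congrArg String.toList heq
      simp at this
      simp [this]
    exact pvSpl_no_space (cs.map pvMask) [] (by simp) chunk hchunk hs
  rw [hsp]
  simp only [Nat.add_zero, Nat.zero_add, ne_eq, not_true_eq_false, if_false]
  by_cases hz : pieces.count "" = 0
  · simp only [hz, not_true_eq_false, if_false]
    rw [hB]
    rw [← pv_filter_map]
    refine (List.filter_eq_self.mpr (fun x hx => ?_)).symm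
    simp
    rintro rfl
    exact (List.count_eq_zero.mp hz) hx
  · simp only [hz, not_false_eq_true, if_true]
    rw [pv_removeloop]
    rw [pv_filter_map, hB]
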